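-- pv_equiv track=rewrite | github.com/sidneijp/u-monopoly | web/src/main/utils/env_parsers.py | remove_closing_quotes
-- ===== SOURCE A (Python) =====
-- def remove_closing_quotes(quoted_string: str) -> str:
--     def has_closing_quotes(quoted_string):
--         _quotes = ['"', "'"]
--         does_starts = any(quoted_string.startswith(quote) for quote in _quotes)
--         does_ends = any(quoted_string.endswith(quote) for quote in _quotes)
--         return does_starts or does_ends
--
--     while has_closing_quotes(quoted_string):
--         quoted_string = quoted_string.strip('"').strip("'")
--     return quoted_string
-- ===== SOURCE B (Python) =====
-- def remove_closing_quotes(quoted_string: str) -> str: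
--     return quoted_string.strip("\"'")
-- ===== Notes on version B (the rewrite author's own statement) =====
-- stated objective: simpler
-- what changed: Replaces the fixpoint loop that repeatedly strips double quotes and then single quotes until no quote remains at either end with a single strip call over the combined two-character class, which removes the same maximal boundary quote runs in one pass.
import Mathlib
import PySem

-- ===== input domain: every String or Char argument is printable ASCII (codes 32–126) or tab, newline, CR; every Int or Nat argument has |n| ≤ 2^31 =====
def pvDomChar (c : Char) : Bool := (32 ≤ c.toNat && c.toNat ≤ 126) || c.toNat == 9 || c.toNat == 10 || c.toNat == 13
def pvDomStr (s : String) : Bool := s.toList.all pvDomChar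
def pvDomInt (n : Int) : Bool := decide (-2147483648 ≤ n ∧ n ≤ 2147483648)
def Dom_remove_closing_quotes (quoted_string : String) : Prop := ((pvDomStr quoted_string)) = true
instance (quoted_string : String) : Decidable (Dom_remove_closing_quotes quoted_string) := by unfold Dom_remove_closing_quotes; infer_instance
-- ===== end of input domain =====

-- B replaces A's fixpoint quote-peeling loop with a single strip over the combined
-- character class "\"'" (objective: simpler); proved equal on all strings.


-- ===== PORT A =====
-- inner helper has_closing_quotes, transliterated
def pvHasClosingQuotes (quoted_string : List Char) : Bool :=
  let _quotes : List Char := ['"', '\'']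
  let does_starts := _quotes.any (fun quote => PySem.Chars.startswith quoted_string [quote])
  let does_ends := _quotes.any (fun quote => PySem.Chars.endswith quoted_string [quote])
  does_starts || does_ends

-- termination lemmas for the while-loop (cited by decreasing_by)
theorem pv_stripChars_eq (s chars : List Char) :
    PySem.Chars.stripChars s chars =
      List.rdropWhile (fun c => chars.contains c) (List.dropWhile (fun c => chars.contains c) s) := by
  simp [PySem.Chars.stripChars, List.rdropWhile]

theorem pv_len_rdrop_le (p : Char → Bool) (l : List Char) :
    (List.rdropWhile p l).length ≤ l.length := by
  simpa [List.rdropWhile] using List.length_dropWhile_le p l.reverse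

theorem pv_len_strip_le (s chars : List Char) :
    (PySem.Chars.stripChars s chars).length ≤ s.length := by
  rw [pv_stripChars_eq]
  exact le_trans (pv_len_rdrop_le _ _) (List.length_dropWhile_le _ s)

theorem pv_strip_infix (s chars : List Char) : PySem.Chars.stripChars s chars <:+: s := by
  rw [pv_stripChars_eq]
  exact ((List.rdropWhile_prefix _ _).isInfix).trans ((List.dropWhile_suffix _).isInfix)

theorem pv_rdrop_last_lt (p : Char → Bool) (l : List Char) (c : Char)
    (h : l.getLast? = some c) (hp : p c = true) :
    (List.rdropWhile p l).length < l.length := by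
  have hh : l.reverse.head? = some c := by rw [List.head?_reverse]; exact h
  obtain ⟨t, ht⟩ := List.head?_eq_some_iff.mp hh
  have hlen : l.length = t.length + 1 := by
    have := congrArg List.length ht; simpa using this
  rw [List.rdropWhile, ht, List.dropWhile_cons_of_pos hp, List.length_reverse, hlen]
  exact Nat.lt_succ_of_le (List.length_dropWhile_le p t)

theorem pv_strip_head_lt (chars : List Char) (c : Char) (t : List Char)
    (h : chars.contains c = true) :
    (PySem.Chars.stripChars (c :: t) chars).length < (c :: t).length := by
  rw [pv_stripChars_eq]
  refine lt_of_le_of_lt (pv_len_rdrop_le _ _) ?_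
  rw [List.dropWhile_cons_of_pos h]
  exact Nat.lt_succ_of_le (List.length_dropWhile_le _ t)

theorem pv_strip_last_lt (chars l : List Char) (c : Char)
    (hl : l.getLast? = some c) (h : chars.contains c = true) :
    (PySem.Chars.stripChars l chars).length < l.length := by
  rw [pv_stripChars_eq]
  set d := List.dropWhile (fun x => chars.contains x) l with hd
  by_cases hnil : d = []
  · rw [hnil]
    have : l ≠ [] := by intro h0; rw [h0] at hl; simp at hl
    simpa [List.rdropWhile] using List.length_pos_of_ne_nil this
  · obtain ⟨pre, hpre⟩ := List.dropWhile_suffix (l := l) (fun x => chars.contains x)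
    have hdl : d.getLast? = some c := by
      rw [← hl, ← hpre]
      exact (List.getLast?_append_of_ne_nil pre hnil).symm
    refine lt_of_lt_of_le (pv_rdrop_last_lt _ d c hdl h) ?_
    rw [hd]; exact List.length_dropWhile_le _ l

theorem pvHas_iff (cs : List Char) :
    pvHasClosingQuotes cs = true ↔
      (['"'] <+: cs ∨ ['\''] <+: cs ∨ ['"'] <:+ cs ∨ ['\''] <:+ cs) := by
  simp [pvHasClosingQuotes, PySem.Chars.startswith_iff, PySem.Chars.endswith_iff, or_assoc]

theorem pvStrip2_lt (s : List Char) (h : pvHasClosingQuotes s = true) :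
    (PySem.Chars.stripChars (PySem.Chars.stripChars s ['"']) ['\'']).length < s.length := by
  have key := (pvHas_iff s).mp h
  have hle1 : (PySem.Chars.stripChars s ['"']).length ≤ s.length := pv_len_strip_le s _
  -- helper: if the first strip is already strictly shorter, we are done
  have done1 : (PySem.Chars.stripChars s ['"']).length < s.length →
      (PySem.Chars.stripChars (PySem.Chars.stripChars s ['"']) ['\'']).length < s.length :=
    fun hlt => lt_of_le_of_lt (pv_len_strip_le _ _) hlt
  -- otherwise the first strip is the identity
  have eq1 : (PySem.Chars.stripChars s ['"']).length = s.length →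
      PySem.Chars.stripChars s ['"'] = s := fun he =>
    ((pv_strip_infix s ['"']).sublist).eq_of_length he
  rcases key with hpre | hpre | hsuf | hsuf
  · obtain ⟨t, ht⟩ := hpre
    subst ht
    exact done1 (pv_strip_head_lt _ _ _ (by decide))
  · rcases lt_or_eq_of_le hle1 with hlt | he
    · exact done1 hlt
    · obtain ⟨t, ht⟩ := hpre
      rw [eq1 he, ← ht]
      exact pv_strip_head_lt _ _ _ (by decide)
  · obtain ⟨pre, hpre'⟩ := hsuf
    have hlast : s.getLast? = some '"' := by rw [← hpre']; simp
    exact done1 (pv_strip_last_lt _ _ _ hlast (by decide))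
  · rcases lt_or_eq_of_le hle1 with hlt | he
    · exact done1 hlt
    · obtain ⟨pre, hpre'⟩ := hsuf
      have hlast : s.getLast? = some '\'' := by rw [← hpre']; simp
      rw [eq1 he]
      exact pv_strip_last_lt _ _ _ hlast (by decide)

-- while has_closing_quotes(quoted_string): quoted_string = quoted_string.strip('"').strip("'")
def pvStripLoop (quoted_string : List Char) : List Char :=
  if h : pvHasClosingQuotes quoted_string = true then
    pvStripLoop (PySem.Chars.stripChars (PySem.Chars.stripChars quoted_string ['"']) ['\''])
  else quoted_string
termination_by quoted_string.length
decreasing_by exact pvStrip2_lt quoted_string h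

def remove_closing_quotes (quoted_string : String) : String :=
  String.ofList (pvStripLoop quoted_string.toList)

-- ===== PORT B =====
def remove_closing_quotes_alt (quoted_string : String) : String :=
  PySem.Str.stripChars quoted_string "\"'"

-- ===== PRECONDITION & SPEC =====
def Spec_remove_closing_quotes (quoted_string : String) (out : String) : Prop := out = remove_closing_quotes_alt quoted_string
instance (quoted_string : String) (out : String) : Decidable (Spec_remove_closing_quotes quoted_string out) := by unfold Spec_remove_closing_quotes; infer_instance

-- ===== CLAIM (what is proved, stated in full; the proofs are below) =====
def Claim_equal_remove_closing_quotes : Prop := ∀ (quoted_string : String), Dom_remove_closing_quotes quoted_string → Spec_remove_closing_quotes quoted_string (remove_closing_quotes quoted_string)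

-- ===== LEMMAS AND PROOFS =====

theorem pv_head_prefix (cs : List Char) (hl : 0 < cs.length) : [cs[0]] <+: cs := by
  cases cs with
  | nil => simp at hl
  | cons a t => exact ⟨t, rfl⟩

-- dropping a p-run then a q-run from the front, p ⊆ q, is dropping the q-run
theorem pv_drop_drop (p q : Char → Bool) (hpq : ∀ c, p c = true → q c = true) (l : List Char) :
    List.dropWhile q (List.dropWhile p l) = List.dropWhile q l := by
  induction l with
  | nil => simp
  | cons c t ih =>
    by_cases h : p c = true
    · rw [List.dropWhile_cons_of_pos h, ih, List.dropWhile_cons_of_pos (hpq c h)]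
    · rw [List.dropWhile_cons_of_neg h]

theorem pv_rdrop_rdrop (p q : Char → Bool) (hpq : ∀ c, p c = true → q c = true) (l : List Char) :
    List.rdropWhile q (List.rdropWhile p l) = List.rdropWhile q l := by
  simp [List.rdropWhile, pv_drop_drop p q hpq]

-- dropping a q-run at the front and a p-run at the back commute
theorem pv_drop_rdrop_comm (p q : Char → Bool) (l : List Char) :
    List.dropWhile q (List.rdropWhile p l) = List.rdropWhile p (List.dropWhile q l) := by
  induction l using List.reverseRecOn with
  | nil => simp
  | append_singleton xs x ih =>
    by_cases hp : p x = true
    · rw [List.rdropWhile_concat_pos _ _ _ hp, ih, List.dropWhile_append]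
      by_cases he : (List.dropWhile q xs).isEmpty = true
      · rw [if_pos he]
        rw [List.isEmpty_iff] at he
        rw [he]
        by_cases hq : q x = true
        · simp [List.dropWhile_cons_of_pos hq]
        · simp [List.dropWhile_cons_of_neg hq, List.rdropWhile, List.dropWhile_cons_of_pos hp]
      · rw [if_neg he, List.rdropWhile_concat_pos _ _ _ hp]
    · rw [List.rdropWhile_concat_neg _ _ _ hp, List.dropWhile_append]
      by_cases he : (List.dropWhile q xs).isEmpty = true
      · rw [if_pos he]
        by_cases hq : q x = true
        · simp [List.dropWhile_cons_of_pos hq]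
        · simp [List.rdropWhile, List.dropWhile_cons_of_neg hp, List.dropWhile_cons_of_neg hq]
      · rw [if_neg he, List.rdropWhile_concat_neg _ _ _ hp]

-- stripping chars A then chars B, A ⊆ B, equals stripping B alone
theorem pv_strip_absorb (A B : List Char) (h : ∀ c, A.contains c = true → B.contains c = true)
    (l : List Char) :
    PySem.Chars.stripChars (PySem.Chars.stripChars l A) B = PySem.Chars.stripChars l B := by
  simp only [pv_stripChars_eq]
  rw [pv_drop_rdrop_comm, pv_rdrop_rdrop _ _ h, pv_drop_drop _ _ h]

-- when no quote sits at either end, stripping the quote class is the identity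
theorem pv_strip_eq_self (cs : List Char) (h : pvHasClosingQuotes cs = false) :
    PySem.Chars.stripChars cs ['"', '\''] = cs := by
  have h' : ¬ (['"'] <+: cs ∨ ['\''] <+: cs ∨ ['"'] <:+ cs ∨ ['\''] <:+ cs) := by
    rw [← pvHas_iff]; simp [h]
  push_neg at h'
  obtain ⟨hs1, hs2, he1, he2⟩ := h'
  rw [pv_stripChars_eq]
  have h1 : List.dropWhile (fun c => (['"', '\''] : List Char).contains c) cs = cs := by
    rw [List.dropWhile_eq_self_iff]
    intro hl hp
    simp only [List.contains_cons, List.contains_nil, Bool.or_false, Bool.or_eq_true,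
      beq_iff_eq] at hp
    rcases hp with hp | hp <;>
      [exact hs1 (hp ▸ pv_head_prefix cs hl); exact hs2 (hp ▸ pv_head_prefix cs hl)]
  rw [h1, List.rdropWhile_eq_self_iff]
  intro hl hp
  have hsuf : [cs.getLast hl] <:+ cs := ⟨cs.dropLast, List.dropLast_append_getLast hl⟩
  simp only [List.contains_cons, List.contains_nil, Bool.or_false, Bool.or_eq_true,
    beq_iff_eq] at hp
  rcases hp with hp | hp <;> [exact he1 (by rwa [hp] at hsuf); exact he2 (by rwa [hp] at hsuf)]

theorem pvLoop_eq (cs : List Char) : pvStripLoop cs = PySem.Chars.stripChars cs ['"', '\''] := by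
  induction cs using pvStripLoop.induct with
  | case1 cs h ih =>
    rw [pvStripLoop, dif_pos h, ih,
      pv_strip_absorb ['\''] ['"', '\''] (by intro c hc; simp at hc; simp [hc]) _,
      pv_strip_absorb ['"'] ['"', '\''] (by intro c hc; simp at hc; simp [hc]) _]
  | case2 cs h =>
    rw [pvStripLoop, dif_neg h, pv_strip_eq_self cs (by simpa using h)]

-- ===== VERDICT (by name: the statement is the Claim_ definition above) =====
theorem remove_closing_quotes_spec : Claim_equal_remove_closing_quotes := by
  intro s _
  unfold Spec_remove_closing_quotes remove_closing_quotes remove_closing_quotes_alt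
  rw [← String.toList_inj, String.toList_ofList, PySem.Str.toList_stripChars, pvLoop_eq]
  rfl
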